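-- pv_equiv track=rewrite | github.com/JerryYanTY/CS5001-Spring-2024 | lab6/sum_before.py | sum_before
-- ===== SOURCE A (Python) =====
-- def sum_before(n: list[int]) -> bool:
--     if len(n) <= 2 and n[0] != n[1]:   # if the final two numbers (prev. sum and last no.) are different, return false
--         return False
--     if n[0] == n[1]:   # if the first two numbers (prev. sum and last no.) are the same, return true
--         return True
--     n[0] = n[0] + n[1]   # sum up the first two no.
--     n.pop(1)   # remove the second number
--     return sum_before(n)   # recursively call the function
-- ===== SOURCE B (Python) =====
-- def sum_before(n: list[int]) -> bool:
--     s = n[0]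
--     for x in n[1:]:
--         if s == x:
--             return True
--         s += x
--     return False
-- ===== Notes on version B (the rewrite author's own statement) =====
-- stated objective: faster
-- what changed: replaced the recursive pop(1)-and-merge scheme (each step rebuilds the list, O(n^2)) with a single pass keeping a running sum; B also leaves the input list unmutated
import Mathlib
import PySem

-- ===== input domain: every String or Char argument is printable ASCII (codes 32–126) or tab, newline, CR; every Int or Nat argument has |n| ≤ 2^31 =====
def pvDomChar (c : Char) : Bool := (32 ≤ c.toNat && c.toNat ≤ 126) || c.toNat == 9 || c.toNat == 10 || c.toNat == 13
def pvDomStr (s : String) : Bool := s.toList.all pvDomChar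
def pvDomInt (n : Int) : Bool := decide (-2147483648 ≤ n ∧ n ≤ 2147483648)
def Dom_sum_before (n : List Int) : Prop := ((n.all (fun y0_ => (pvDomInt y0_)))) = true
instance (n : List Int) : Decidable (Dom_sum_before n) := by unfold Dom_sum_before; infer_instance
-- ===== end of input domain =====

-- B replaces A's recursive pop-and-merge (O(n^2), mutates the list) by one pass with a
-- running sum (O(n), no mutation); equivalence is about the RETURN value only — A
-- destructively collapses its argument list, B leaves it untouched.

-- ===== PORT A =====
-- Python A raises IndexError on lists of length < 2 (excluded by Pre_); the unreachable
-- fallthrough branch here returns false.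
def sum_before (n : List Int) : Bool :=
  match n with
  | a :: b :: rest =>
      if n.length ≤ 2 ∧ a ≠ b then false
      else if a = b then true
      else sum_before ((a + b) :: rest)
  | _ => false
termination_by n.length

-- ===== PORT B =====
def sum_before_alt_loop (s : Int) (xs : List Int) : Bool :=
  match xs with
  | [] => false
  | x :: rest => if s = x then true else sum_before_alt_loop (s + x) rest

def sum_before_alt (n : List Int) : Bool :=
  match n with
  | [] => false
  | x :: xs => sum_before_alt_loop x xs

-- ===== PRECONDITION & SPEC =====
-- Pre_ excludes lists of length < 2, on which Python A raises IndexError.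
def Pre_sum_before (n : List Int) : Prop := 2 ≤ n.length
instance (n : List Int) : Decidable (Pre_sum_before n) := by unfold Pre_sum_before; infer_instance
def pvWitness_sum_before : List Int := [1, 2, 3, 6]

def Spec_sum_before (n : List Int) (out : Bool) : Prop := out = sum_before_alt n
instance (n : List Int) (out : Bool) : Decidable (Spec_sum_before n out) := by unfold Spec_sum_before; infer_instance

-- ===== CLAIM (what is proved, stated in full; the proofs are below) =====
def Claim_equal_sum_before : Prop := ∀ (n : List Int), Dom_sum_before n → Pre_sum_before n → Spec_sum_before n (sum_before n)

-- ===== LEMMAS AND PROOFS =====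
theorem sum_before_cons_cons (a b : Int) (rest : List Int) :
    sum_before (a :: b :: rest) = sum_before_alt_loop a (b :: rest) := by
  induction rest generalizing a b with
  | nil =>
      by_cases h : a = b <;> simp [sum_before, sum_before_alt_loop, h]
  | cons c rs ih =>
      by_cases h : a = b
      · simp [sum_before, sum_before_alt_loop, h]
      · simp [sum_before, sum_before_alt_loop, h, ih]

-- ===== VERDICT (by name: the statement is the Claim_ definition above) =====
theorem sum_before_spec : Claim_equal_sum_before := by
  intro n _ hpre
  match n with
  | a :: b :: rest =>
      unfold Spec_sum_before sum_before_alt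
      exact sum_before_cons_cons a b rest
  | [] => simp [Pre_sum_before] at hpre
  | [a] => simp [Pre_sum_before] at hpre
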